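-- pv_equiv track=rewrite | github.com/punkryn/ryu_algo | 0709/n으로만들기.py | dfs
-- ===== SOURCE A (Python) =====
-- def dfs(s):
--     L = set(list(s))
--     if len(L) == 1:
--         return 1
--
--     ret = 0
--     ret += dfs(s[1:])
--     ret += dfs(s[:-1])
--     return ret
-- ===== SOURCE B (Python) =====
-- def dfs(s):
--     n = len(s)
--     f = {}
--     for length in range(1, n + 1):
--         for i in range(n - length + 1):
--             j = i + length - 1
--             if len(set(s[i:j + 1])) == 1:
--                 f[(i, j)] = 1
--             else:
--                 f[(i, j)] = f[(i + 1, j)] + f[(i, j - 1)]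
--     return f[(0, n - 1)]
-- ===== Notes on version B (the rewrite author's own statement) =====
-- stated objective: faster
-- what changed: Replaced the exponential two-sided shrinking recursion by a bottom-up dynamic program over substring bounds (i,j), filling a table by increasing length, so each of the O(n^2) substrings is evaluated once.
import Mathlib
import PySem

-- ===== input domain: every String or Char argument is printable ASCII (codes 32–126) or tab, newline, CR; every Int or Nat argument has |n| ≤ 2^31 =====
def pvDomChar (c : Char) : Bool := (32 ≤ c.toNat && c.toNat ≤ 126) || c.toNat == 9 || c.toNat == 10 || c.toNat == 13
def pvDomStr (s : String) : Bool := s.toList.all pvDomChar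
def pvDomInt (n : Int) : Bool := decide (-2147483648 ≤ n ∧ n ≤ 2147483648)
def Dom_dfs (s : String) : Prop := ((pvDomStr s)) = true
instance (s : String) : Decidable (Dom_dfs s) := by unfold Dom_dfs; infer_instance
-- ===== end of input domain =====

-- B replaces A's exponential shrink-left/shrink-right recursion by a bottom-up DP table over
-- substring bounds (i,j), filled by increasing length (measured asymptotically faster).

-- ===== PORT A =====
-- A recurses on s[1:] and s[:-1]; on a nonempty string every call shrinks the length by 1,
-- so fuel = length suffices. On s = "" Python never terminates (RecursionError) — excluded
-- by Pre_; the fuel-0 result 0 is dead code under Pre_.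
def dfsA : Nat → List Char → Int
  | 0, _ => 0
  | fuel+1, l =>
    if PySem.Set.len (PySem.Set.ofList l) == 1 then 1
    else dfsA fuel (PySem.List.slice l (some 1) none)
         + dfsA fuel (PySem.List.slice l none (some (-1)))

def dfs (s : String) : Int := dfsA s.toList.length s.toList

-- ===== PORT B =====
-- literal transliteration of Source B: table f over keys (i,j), filled by increasing length.
-- Python's f[(i+1,j)] / f[(i,j-1)] / final f[(0,n-1)] raise KeyError only when the key is
-- absent, which never happens for nonempty s (proved below); ported as getD _ 0.
def dfs_alt (s : String) : Int :=
  let l := s.toList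
  let n : Int := l.length
  let f : PySem.Dict (Int × Int) Int :=
    (PySem.List.pyRange 1 (n + 1) 1).foldl (fun f len =>
      (PySem.List.pyRange 0 (n - len + 1) 1).foldl (fun f i =>
        let j := i + len - 1
        if PySem.Set.len (PySem.Set.ofList (PySem.List.slice l (some i) (some (j + 1)))) == 1
        then f.insert (i, j) 1
        else f.insert (i, j) (f.getD (i + 1, j) 0 + f.getD (i, j - 1) 0)) f)
      PySem.Dict.empty
  f.getD (0, n - 1) 0

-- ===== PRECONDITION & SPEC =====
-- Pre_ excludes only the empty string, on which A recurses forever (Python RecursionError).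
def Pre_dfs (s : String) : Prop := s.toList ≠ []
instance (s : String) : Decidable (Pre_dfs s) := by unfold Pre_dfs; infer_instance
def pvWitness_dfs : String := "ab"

def Spec_dfs (s : String) (out : Int) : Prop := out = dfs_alt s
instance (s : String) (out : Int) : Decidable (Spec_dfs s out) := by unfold Spec_dfs; infer_instance

-- ===== CLAIM (what is proved, stated in full; the proofs are below) =====
def Claim_equal_dfs : Prop := ∀ (s : String), Dom_dfs s → Pre_dfs s → Spec_dfs s (dfs s)

-- ===== LEMMAS AND PROOFS =====

-- the "all characters equal" test, exactly as both Pythons phrase it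
def allEq (l : List Char) : Bool := PySem.Set.len (PySem.Set.ofList l) == 1

-- mathematical specification of A's recursion (well-founded on length)
def F : List Char → Int
  | l =>
    if h : l = [] then 0
    else if allEq l then 1
    else F l.tail + F l.dropLast
termination_by l => l.length
decreasing_by
  · have := List.length_pos_of_ne_nil h
    simp [List.length_tail]; omega
  · have := List.length_pos_of_ne_nil h
    simp [List.length_dropLast]; omega

lemma allEq_singleton (c : Char) : allEq [c] = true := rfl

lemma F_eq_one {l : List Char} (hne : l ≠ []) (hA : allEq l = true) : F l = 1 := by
  rw [F, dif_neg hne, if_pos hA]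

lemma two_le_of_not_allEq {l : List Char} (hne : l ≠ []) (h : allEq l = false) :
    2 ≤ l.length := by
  cases l with
  | nil => exact absurd rfl hne
  | cons a t =>
    cases t with
    | nil => rw [allEq_singleton] at h; cases h
    | cons b t' => simp only [List.length_cons]; omega

lemma dfsA_eq_F : ∀ (fuel : Nat) (l : List Char), l ≠ [] → l.length ≤ fuel →
    dfsA fuel l = F l := by
  intro fuel
  induction fuel with
  | zero =>
    intro l hne hlen
    exact absurd (List.length_eq_zero_iff.mp (Nat.le_zero.mp hlen)) hne
  | succ n ih =>
    intro l hne hlen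
    rw [dfsA, F, dif_neg hne]
    by_cases hA : allEq l = true
    · rw [if_pos hA]
      unfold allEq at hA
      rw [if_pos hA]
    · have hA' : allEq l = false := by rwa [Bool.not_eq_true] at hA
      have h2 : 2 ≤ l.length := two_le_of_not_allEq hne hA'
      have hAr : ((PySem.Set.ofList l).len == 1) = false := hA'
      rw [if_neg (by rw [hAr]; simp), if_neg (by rw [hA']; simp)]
      rw [PySem.List.slice_from_one, PySem.List.slice_to_neg_one]
      have ht : l.tail ≠ [] := by
        intro hc; have := congrArg List.length hc
        simp [List.length_tail] at this; omega
      have hd : l.dropLast ≠ [] := by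
        intro hc; have := congrArg List.length hc
        simp [List.length_dropLast] at this; omega
      rw [ih _ ht (by simp [List.length_tail]; omega),
          ih _ hd (by simp [List.length_dropLast]; omega)]

-- the substring s[i : i+len]
def seg (l : List Char) (i len : Nat) : List Char := (l.drop i).take len

lemma seg_tail (l : List Char) (i len : Nat) :
    (seg l i (len + 1)).tail = seg l (i + 1) len := by
  unfold seg
  rw [← List.tail_drop]
  generalize l.drop i = xs
  cases xs <;> simp

lemma seg_dropLast (l : List Char) (i len : Nat) (h : i + len + 1 ≤ l.length) :
    (seg l i (len + 1)).dropLast = seg l i len := by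
  have hl : (seg l i (len + 1)).length = len + 1 := by
    simp [seg]; omega
  rw [List.dropLast_eq_take, hl]
  simp [seg, List.take_take]

lemma seg_ne_nil (l : List Char) (i len : Nat) (h1 : 1 ≤ len) (h2 : i + len ≤ l.length) :
    seg l i len ≠ [] := by
  have hlen : (seg l i len).length = len := by simp [seg]; omega
  intro hc; rw [hc] at hlen; simp at hlen; omega

lemma seg_one (l : List Char) (m : Nat) (h : m < l.length) : ∃ c, seg l m 1 = [c] := by
  unfold seg
  cases hd : l.drop m with
  | nil =>
    exfalso; have := congrArg List.length hd
    simp at this; omega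
  | cons a t => exact ⟨a, by simp⟩

-- F's recurrence in seg form
lemma F_seg_rec (l : List Char) (i len : Nat) (h2 : i + (len + 2) ≤ l.length)
    (hA : allEq (seg l i (len + 2)) = false) :
    F (seg l i (len + 2)) = F (seg l (i + 1) (len + 1)) + F (seg l i (len + 1)) := by
  rw [F, dif_neg (seg_ne_nil l i (len + 2) (by omega) h2), if_neg (by simp [hA])]
  rw [seg_tail, seg_dropLast l i (len + 1) (by omega)]

-- B's inner-loop body and outer-loop body, definitionally equal to dfs_alt's lambdas
def stepB (l : List Char) (len : Int) (f : PySem.Dict (Int × Int) Int) (i : Int) :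
    PySem.Dict (Int × Int) Int :=
  if PySem.Set.len (PySem.Set.ofList (PySem.List.slice l (some i) (some (i + len - 1 + 1)))) == 1
  then f.insert (i, i + len - 1) 1
  else f.insert (i, i + len - 1)
        (f.getD (i + 1, i + len - 1) 0 + f.getD (i, i + len - 1 - 1) 0)

def outerB (l : List Char) (f : PySem.Dict (Int × Int) Int) (len : Int) :
    PySem.Dict (Int × Int) Int :=
  (PySem.List.pyRange 0 ((l.length : Int) - len + 1) 1).foldl (stepB l len) f

-- the table invariant: every key of span ≤ L holds F of its substring
def Good (l : List Char) (f : PySem.Dict (Int × Int) Int) (L : Int) : Prop :=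
  ∀ i j : Int, 0 ≤ i → i ≤ j → j < (l.length : Int) → j - i + 1 ≤ L →
    f.get? (i, j) = some (F (seg l i.toNat (j - i + 1).toNat))

-- the current layer: keys of span lam with left index < m are present and correct
def Layer (l : List Char) (f : PySem.Dict (Int × Int) Int) (lam m : Nat) : Prop :=
  ∀ i j : Int, 0 ≤ i → i < (m : Int) → j = i + (lam : Int) - 1 →
    f.get? (i, j) = some (F (seg l i.toNat lam))

lemma inner_pass (l : List Char) (lam : Nat) (h1 : 1 ≤ lam) (hln : lam ≤ l.length)
    (f : PySem.Dict (Int × Int) Int) (hG : Good l f ((lam : Int) - 1)) :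
    ∀ (m : Nat), m + lam ≤ l.length + 1 →
      Good l ((PySem.List.pyRange 0 (m : Int) 1).foldl (stepB l (lam : Int)) f)
        ((lam : Int) - 1) ∧
      Layer l ((PySem.List.pyRange 0 (m : Int) 1).foldl (stepB l (lam : Int)) f) lam m := by
  intro m
  induction m with
  | zero =>
    intro _
    rw [Nat.cast_zero, PySem.List.pyRange_one_eq_nil le_rfl, List.foldl_nil]
    refine ⟨hG, ?_⟩
    intro i j hi him hj
    exfalso; omega
  | succ m ih =>
    intro hm
    obtain ⟨hg, hlay⟩ := ih (by omega)
    rw [show ((m + 1 : Nat) : Int) = (m : Int) + 1 from by push_cast; ring,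
        PySem.List.pyRange_one_succ_right (by omega : (0 : Int) ≤ (m : Int)),
        List.foldl_append, List.foldl_cons, List.foldl_nil]
    set fp := (PySem.List.pyRange 0 (m : Int) 1).foldl (stepB l (lam : Int)) f with hfp
    unfold stepB
    rw [show ((m : Int) + (lam : Int) - 1 + 1) = (m : Int) + (lam : Int) from by ring,
        PySem.List.slice_natCast_add]
    have hseg : (l.drop m).take lam = seg l m lam := rfl
    rw [hseg]
    have hmn : m + lam ≤ l.length := by omega
    by_cases hA : allEq (seg l m lam) = true
    · have hAraw : (PySem.Set.len (PySem.Set.ofList (seg l m lam)) == 1) = true := hA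
      rw [if_pos hAraw]
      constructor
      · intro i j hi hij hj hspan
        rw [PySem.Dict.get?_insert, if_neg ?hne1]
        · exact hg i j hi hij hj hspan
        case hne1 =>
          intro he
          obtain ⟨e1, e2⟩ := Prod.mk.inj he
          omega
      · intro i j hi him hj
        by_cases hei : i = (m : Int)
        · subst hj; rw [hei]
          rw [PySem.Dict.get?_insert, if_pos rfl]
          have ht : ((m : Int)).toNat = m := by omega
          rw [ht, F_eq_one (seg_ne_nil l m lam h1 hmn) hA]
        · rw [PySem.Dict.get?_insert, if_neg ?hne2]
          · exact hlay i j hi (by omega) hj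
          case hne2 =>
            intro he
            obtain ⟨e1, e2⟩ := Prod.mk.inj he
            exact hei e1
    · have hA' : allEq (seg l m lam) = false := by rwa [Bool.not_eq_true] at hA
      -- lam = 1 is impossible: a single character is always all-equal
      have hlam2 : 2 ≤ lam := by
        by_contra hc
        have h1' : lam = 1 := by omega
        obtain ⟨c, hcseg⟩ := seg_one l m (by omega)
        rw [h1'] at hA'
        rw [hcseg, allEq_singleton] at hA'
        cases hA'
      obtain ⟨μ, rfl⟩ : ∃ μ, lam = μ + 2 := ⟨lam - 2, by omega⟩
      have hAraw : (PySem.Set.len (PySem.Set.ofList (seg l m (μ + 2))) == 1) = false := hA'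
      rw [if_neg (by rw [hAraw]; simp)]
      -- the two looked-up table entries
      have hx1 := hg ((m : Int) + 1) ((m : Int) + ((μ + 2 : Nat) : Int) - 1)
        (by omega) (by push_cast; omega) (by push_cast; omega) (by push_cast; omega)
      have hx2 := hg (m : Int) ((m : Int) + ((μ + 2 : Nat) : Int) - 1 - 1)
        (by omega) (by push_cast; omega) (by push_cast; omega) (by push_cast; omega)
      have t1 : ((m : Int) + 1).toNat = m + 1 := by omega
      have t2 : ((m : Int) + ((μ + 2 : Nat) : Int) - 1 - ((m : Int) + 1) + 1).toNat = μ + 1 := by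
        push_cast; omega
      have t3 : ((m : Int)).toNat = m := by omega
      have t4 : ((m : Int) + ((μ + 2 : Nat) : Int) - 1 - 1 - (m : Int) + 1).toNat = μ + 1 := by
        push_cast; omega
      rw [t1, t2] at hx1
      rw [t3, t4] at hx2
      have hval : fp.getD ((m : Int) + 1, (m : Int) + ((μ + 2 : Nat) : Int) - 1) 0
            + fp.getD ((m : Int), (m : Int) + ((μ + 2 : Nat) : Int) - 1 - 1) 0
          = F (seg l m (μ + 2)) := by
        rw [PySem.Dict.getD_eq_get?_getD, PySem.Dict.getD_eq_get?_getD, hx1, hx2]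
        simp only [Option.getD_some]
        rw [F_seg_rec l m μ (by omega) hA']
      constructor
      · intro i j hi hij hj hspan
        rw [PySem.Dict.get?_insert, if_neg ?hne3]
        · exact hg i j hi hij hj hspan
        case hne3 =>
          intro he
          obtain ⟨e1, e2⟩ := Prod.mk.inj he
          push_cast at e2
          omega
      · intro i j hi him hj
        by_cases hei : i = (m : Int)
        · subst hj; rw [hei]
          rw [PySem.Dict.get?_insert, if_pos rfl, hval, t3]
        · rw [PySem.Dict.get?_insert, if_neg ?hne4]
          · exact hlay i j hi (by omega) hj
          case hne4 =>
            intro he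
            obtain ⟨e1, e2⟩ := Prod.mk.inj he
            exact hei e1

lemma outer_pass (l : List Char) : ∀ (L : Nat), L ≤ l.length →
    Good l ((PySem.List.pyRange 1 ((L : Int) + 1) 1).foldl (outerB l) PySem.Dict.empty)
      (L : Int) := by
  intro L
  induction L with
  | zero =>
    intro _
    rw [Nat.cast_zero, zero_add, PySem.List.pyRange_one_eq_nil le_rfl, List.foldl_nil]
    intro i j hi hij hj hspan
    exfalso; omega
  | succ L ih =>
    intro hL
    rw [show ((L + 1 : Nat) : Int) + 1 = ((L : Int) + 1) + 1 from by push_cast; ring,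
        PySem.List.pyRange_one_succ_right (by omega : (1 : Int) ≤ (L : Int) + 1),
        List.foldl_append, List.foldl_cons, List.foldl_nil]
    have hprev := ih (by omega)
    unfold outerB
    have e1 : (l.length : Int) - ((L : Int) + 1) + 1 = ((l.length - L : Nat) : Int) := by
      have : L ≤ l.length := by omega
      push_cast [this]; ring
    rw [e1, show ((L : Int) + 1) = ((L + 1 : Nat) : Int) from by push_cast; ring]
    have hG' : Good l ((PySem.List.pyRange 1 ((L : Int) + 1) 1).foldl (outerB l)
        PySem.Dict.empty) (((L + 1 : Nat) : Int) - 1) := by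
      rw [show ((L + 1 : Nat) : Int) - 1 = (L : Int) from by push_cast; ring]
      exact hprev
    obtain ⟨hg, hlay⟩ := inner_pass l (L + 1) (by omega) hL _ hG' (l.length - L) (by omega)
    intro i j hi hij hj hspan
    by_cases hsp : j - i + 1 ≤ ((L + 1 : Nat) : Int) - 1
    · exact hg i j hi hij hj hsp
    · have hspeq : j - i + 1 = ((L + 1 : Nat) : Int) := by push_cast at hsp hspan ⊢; omega
      have hv : (j - i + 1).toNat = L + 1 := by omega
      rw [hv]
      exact hlay i j hi (by push_cast at hspeq ⊢; omega) (by omega)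

lemma dfs_alt_eq (s : String) (h : s.toList ≠ []) : dfs_alt s = F s.toList := by
  have hrfl : dfs_alt s =
      ((PySem.List.pyRange 1 ((s.toList.length : Int) + 1) 1).foldl (outerB s.toList)
        PySem.Dict.empty).getD (0, (s.toList.length : Int) - 1) 0 := rfl
  rw [hrfl]
  have hn : 1 ≤ s.toList.length := List.length_pos_of_ne_nil h
  have hget := outer_pass s.toList s.toList.length le_rfl 0 ((s.toList.length : Int) - 1)
    le_rfl (by omega) (by omega) (by omega)
  rw [PySem.Dict.getD_eq_get?_getD, hget]
  have t1 : ((0 : Int)).toNat = 0 := rfl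
  have t2 : ((s.toList.length : Int) - 1 - 0 + 1).toNat = s.toList.length := by omega
  rw [t1, t2]
  show F (seg s.toList 0 s.toList.length) = F s.toList
  unfold seg
  rw [List.drop_zero, List.take_length]

-- ===== VERDICT (by name: the statement is the Claim_ definition above) =====
theorem dfs_spec : Claim_equal_dfs := by
  intro s _ hpre
  unfold Spec_dfs
  rw [show dfs s = dfsA s.toList.length s.toList from rfl,
      dfsA_eq_F _ _ hpre le_rfl, dfs_alt_eq s hpre]
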